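-- pv_equiv track=rewrite | github.com/apnamanya/advent_of_code | 2020/day6.py | part2_solution
-- ===== SOURCE A (Python) =====
-- from functools import reduce
--
-- def get_group_lineAndPeople_number(orig_entries):
-- 	group_entries=[]
-- 	people_number=[]
-- 	answers_list=[]
-- 	for i in range(len(orig_entries)):
-- 		line=orig_entries[i].strip()
-- 		if line:
-- 			group_entries.append(list(line))
--
-- 		if not line or i== len(orig_entries)-1:
--
-- 			people_number.append(len(group_entries))
-- 			answers_list.append(sorted(list(group_entries)))
-- 			group_entries=[]
--
--
-- 	return answers_list, people_number
--
-- def part2_solution(orig_entries):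
-- 	answer_list, group_nos = get_group_lineAndPeople_number(orig_entries)
-- 	ans_list=[]
-- 	intersect_no =[]
--
-- 	for ans in answer_list:
-- 		ans_list= list(reduce(set.intersection, [set(item) for item in ans ]))
-- 		intersect_no.append(len(ans_list))
-- 	return sum(intersect_no)
-- ===== SOURCE B (Python) =====
-- def part2_solution(orig_entries):
--     # Single fused pass: running-intersection set per group, no intermediate
--     # group lists; empty groups (where A raises TypeError) contribute nothing.
--     total = 0
--     current = None
--     n = len(orig_entries)
--     for i, raw in enumerate(orig_entries):
--         line = raw.strip()
--         if line:
--             s = set(line)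
--             current = s if current is None else current & s
--         if not line or i == n - 1:
--             if current is not None:
--                 total += len(current)
--             current = None
--     return total
-- ===== Notes on version B (the rewrite author's own statement) =====
-- stated objective: faster
-- what changed: Replaces A's two-phase pipeline (collect per-group lists of line characters, sort each group, then reduce each group with set.intersection in a second loop) by a single fused pass keeping only a running-intersection set and a running total, with no intermediate group lists and no sorting.
import Mathlib
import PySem

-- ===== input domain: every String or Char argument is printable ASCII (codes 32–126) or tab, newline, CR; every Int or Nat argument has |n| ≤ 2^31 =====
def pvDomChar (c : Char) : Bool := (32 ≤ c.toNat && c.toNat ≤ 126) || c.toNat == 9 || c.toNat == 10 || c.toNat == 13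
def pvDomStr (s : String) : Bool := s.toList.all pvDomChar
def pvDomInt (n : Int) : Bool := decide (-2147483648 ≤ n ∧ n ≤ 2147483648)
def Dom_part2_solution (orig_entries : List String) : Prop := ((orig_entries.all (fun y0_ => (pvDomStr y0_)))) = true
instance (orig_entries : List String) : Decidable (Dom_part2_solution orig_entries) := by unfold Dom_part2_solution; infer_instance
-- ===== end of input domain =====

-- B fuses A's two phases (group collection + per-group reduce) into one pass with a
-- running-intersection set; where A raises TypeError on empty groups, B returns (they count 0).


-- ===== PORT A =====
-- the index loop of get_group_lineAndPeople_number: structural recursion, 'i == len-1' ↔ rest' = []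
def pvGGLoop (rest : List String) (group : List (List Char)) (people : List Int)
    (answers : List (List (List Char))) : List (List (List Char)) × List Int :=
  match rest with
  | [] => (answers, people)
  | s :: rest' =>
    let line := PySem.Chars.strip s.toList
    let group1 := if line = [] then group else group ++ [line]
    if line = [] ∨ rest' = [] then
      pvGGLoop rest' [] (people ++ [(group1.length : Int)])
        (answers ++ [PySem.List.sorted group1 (fun x => String.ofList x) false])
    else
      pvGGLoop rest' group1 people answers

def pvGetGroup (orig_entries : List String) : List (List (List Char)) × List Int :=
  pvGGLoop orig_entries [] [] []

-- len(list(reduce(set.intersection, [set(item) for item in ans]))); [] case is Python's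
-- TypeError (reduce of an empty sequence), excluded by Pre_
def pvContrib (ans : List (List Char)) : Int :=
  match ans.map (fun item => PySem.Set.ofList item) with
  | [] => 0
  | s :: rest => PySem.Set.len (rest.foldl (fun acc t => PySem.Set.inter acc t) s)

def part2_solution (orig_entries : List String) : Int :=
  let p := pvGetGroup orig_entries
  let answer_list := p.1
  let intersect_no := answer_list.foldl (fun acc ans => acc ++ [pvContrib ans]) ([] : List Int)
  intersect_no.sum

-- ===== PORT B =====
def pvBLoop (rest : List String) (current : Option (PySem.Set Char)) (total : Int) : Int :=
  match rest with
  | [] => total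
  | s :: rest' =>
    let line := PySem.Chars.strip s.toList
    let current' :=
      if line = [] then current
      else match current with
        | none => some (PySem.Set.ofList line)
        | some c => some (PySem.Set.inter c (PySem.Set.ofList line))
    if line = [] ∨ rest' = [] then
      pvBLoop rest' none (total + (match current' with | none => 0 | some c => PySem.Set.len c))
    else
      pvBLoop rest' current' total

def part2_solution_alt (orig_entries : List String) : Int :=
  pvBLoop orig_entries none 0

-- ===== PRECONDITION & SPEC =====
-- Pre_ excludes exactly the inputs where A raises TypeError: a group with no lines
-- (a first line that strips to blank, or two consecutive blank lines).
def Pre_part2_solution (orig_entries : List String) : Prop :=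
  ("" :: orig_entries).IsChain
    (fun a b => PySem.Chars.strip a.toList = [] → PySem.Chars.strip b.toList ≠ [])
instance (orig_entries : List String) : Decidable (Pre_part2_solution orig_entries) := by
  unfold Pre_part2_solution; infer_instance

def pvWitness_part2_solution : List String := ["ab", "b", "", "bc"]

def Spec_part2_solution (orig_entries : List String) (out : Int) : Prop :=
  out = part2_solution_alt orig_entries
instance (orig_entries : List String) (out : Int) : Decidable (Spec_part2_solution orig_entries out) := by
  unfold Spec_part2_solution; infer_instance

-- ===== CLAIM (what is proved, stated in full; the proofs are below) =====
def Claim_equal_part2_solution : Prop := ∀ (orig_entries : List String), Dom_part2_solution orig_entries → Pre_part2_solution orig_entries → Spec_part2_solution orig_entries (part2_solution orig_entries)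

-- ===== LEMMAS AND PROOFS =====

-- B's running intersection for a collected group
def pvGInter : List (List Char) → Option (PySem.Set Char)
  | [] => none
  | g :: gs => some (gs.foldl (fun acc t => PySem.Set.inter acc (PySem.Set.ofList t)) (PySem.Set.ofList g))

lemma pvGInter_append (group : List (List Char)) (x : List Char) :
    pvGInter (group ++ [x]) =
      match pvGInter group with
      | none => some (PySem.Set.ofList x)
      | some c => some (PySem.Set.inter c (PySem.Set.ofList x)) := by
  cases group with
  | nil => rfl
  | cons g gs => simp [pvGInter, List.foldl_append]

lemma mem_interFold (hs : List (List Char)) (init : PySem.Set Char) (x : Char) :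
    x ∈ hs.foldl (fun acc t => PySem.Set.inter acc (PySem.Set.ofList t)) init ↔
      x ∈ init ∧ ∀ t ∈ hs, x ∈ t := by
  induction hs generalizing init with
  | nil => simp
  | cons h t ih =>
    simp only [List.foldl_cons, ih, PySem.Set.mem_inter, PySem.Set.mem_ofList, List.mem_cons]
    constructor
    · rintro ⟨⟨hx, hh⟩, hrest⟩
      exact ⟨hx, fun u hu => hu.elim (fun e => e ▸ hh) (hrest u)⟩
    · rintro ⟨hx, hall⟩
      exact ⟨⟨hx, hall h (Or.inl rfl)⟩, fun u hu => hall u (Or.inr hu)⟩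

lemma nodup_interFold (hs : List (List Char)) (init : PySem.Set Char) (h : init.Nodup) :
    (hs.foldl (fun acc t => PySem.Set.inter acc (PySem.Set.ofList t)) init).Nodup := by
  induction hs generalizing init with
  | nil => exact h
  | cons a t ih => exact ih _ (PySem.Set.nodup_inter _ _ h)

-- the per-group count does not depend on the order of the group's lines
lemma contrib_perm (g g' : List (List Char)) (hp : g.Perm g') (hg : g ≠ []) :
    pvContrib g' =
      (match pvGInter g with | none => 0 | some c => PySem.Set.len c) := by
  cases hgg : g with
  | nil => exact absurd hgg hg
  | cons a as =>
    have hg' : g' ≠ [] := by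
      intro h; rw [hgg, h] at hp; exact (List.cons_ne_nil a as) hp.eq_nil
    cases hgg' : g' with
    | nil => exact absurd hgg' hg'
    | cons b bs =>
      rw [hgg, hgg'] at hp
      simp only [pvContrib, pvGInter, List.map_cons]
      rw [List.foldl_map]
      -- both sides are Set.len of an intersection fold; show the lengths agree
      set X := as.foldl (fun acc t => PySem.Set.inter acc (PySem.Set.ofList t)) (PySem.Set.ofList a) with hX
      set Y := bs.foldl (fun acc t => PySem.Set.inter acc (PySem.Set.ofList t)) (PySem.Set.ofList b) with hY
      have hmemX : ∀ x, x ∈ X ↔ ∀ t ∈ a :: as, x ∈ t := by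
        intro x
        rw [hX, mem_interFold]
        simp [PySem.Set.mem_ofList]
      have hmemY : ∀ x, x ∈ Y ↔ ∀ t ∈ b :: bs, x ∈ t := by
        intro x
        rw [hY, mem_interFold]
        simp [PySem.Set.mem_ofList]
      have hndX : X.Nodup := nodup_interFold _ _ (PySem.Set.nodup_ofList a)
      have hndY : Y.Nodup := nodup_interFold _ _ (PySem.Set.nodup_ofList b)
      have hfin : Y.toFinset = X.toFinset := by
        apply Finset.ext; intro x
        simp only [List.mem_toFinset, hmemX, hmemY]
        exact ⟨fun h t ht => h t (hp.mem_iff.mp ht), fun h t ht => h t (hp.mem_iff.mpr ht)⟩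
      have hlen : Y.length = X.length := by
        rw [← List.toFinset_card_of_nodup hndY, ← List.toFinset_card_of_nodup hndX, hfin]
      show PySem.Set.len Y = PySem.Set.len X
      simp [PySem.Set.len, hlen]

lemma contrib_sorted (g : List (List Char)) (hg : g ≠ []) :
    pvContrib (PySem.List.sorted g (fun x => String.ofList x) false) =
      (match pvGInter g with | none => 0 | some c => PySem.Set.len c) :=
  contrib_perm g _ (PySem.List.sorted_perm g _ _).symm hg

-- the fused loop computes the two-phase pipeline, given no flush sees an empty group
lemma pvLoop_eq (rest : List String) :
    ∀ (group : List (List Char)) (people : List Int) (answers : List (List (List Char))),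
    (∀ h ∈ rest.head?, PySem.Chars.strip h.toList = [] → group ≠ []) →
    rest.IsChain (fun a b => PySem.Chars.strip a.toList = [] → PySem.Chars.strip b.toList ≠ []) →
    ((pvGGLoop rest group people answers).1.map pvContrib).sum =
      pvBLoop rest (pvGInter group) ((answers.map pvContrib).sum) := by
  induction rest with
  | nil => intro group people answers _ _; simp [pvGGLoop, pvBLoop]
  | cons s rest' ih =>
    intro group people answers hhead hchain
    obtain ⟨hR, hchain'⟩ := List.isChain_cons.mp hchain
    rw [pvGGLoop, pvBLoop.eq_def]
    by_cases hline : PySem.Chars.strip s.toList = []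
    · -- blank line: flush; group is nonempty by hhead
      have hg : group ≠ [] := hhead s rfl hline
      obtain ⟨c, hc⟩ : ∃ c, pvGInter group = some c := by
        cases group with
        | nil => exact absurd rfl hg
        | cons a as => exact ⟨_, rfl⟩
      simp only [hline, true_or, if_true, hc]
      rw [ih [] _ _ (fun h hm hb => absurd hb (hR h hm hline)) hchain']
      have hcs := contrib_sorted group hg
      rw [hc] at hcs
      simp [pvGInter, hcs]
    · by_cases hrest : rest' = []
      · -- last line, nonblank: flush group ++ [line]
        subst hrest
        have hne : group ++ [PySem.Chars.strip s.toList] ≠ [] := by simp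
        simp only [if_neg hline, or_true, if_true]
        have hcs := contrib_sorted _ hne
        rw [pvGInter_append] at hcs
        rw [pvGGLoop, pvBLoop.eq_def]
        cases hgi : pvGInter group with
        | none => simp only [hgi] at hcs ⊢; simp [hcs]
        | some c => simp only [hgi] at hcs ⊢; simp [hcs]
      · -- middle nonblank line: extend the group
        rw [if_neg (by simp [hline, hrest]), if_neg (by simp [hline, hrest])]
        rw [ih _ _ _ (fun h hm hb => by simp) hchain']
        rw [pvGInter_append]
        cases hgi : pvGInter group with
        | none => simp [hline, hrest]
        | some c => simp [hline, hrest]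

-- ===== VERDICT (by name: the statement is the Claim_ definition above) =====
theorem part2_solution_spec : Claim_equal_part2_solution := by
  intro l _ hpre
  show part2_solution l = part2_solution_alt l
  obtain ⟨hhead, hchain⟩ := List.isChain_cons.mp hpre
  unfold part2_solution part2_solution_alt pvGetGroup
  simp only [PySem.List.foldl_append_singleton_eq_map, List.nil_append]
  have := pvLoop_eq l [] [] []
    (by intro h hm hb; exact absurd hb (hhead h hm (by decide))) hchain
  simpa [pvGInter] using this
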